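-- pv_equiv track=rewrite | github.com/DAMSlabUMBC/Passive-Mode-Study | python/parse_protocols.py | parse_protocol_list
-- ===== SOURCE A (Python) =====
-- layer_3_protos = ["ip", "ipv6"]
--
-- layer_4_protos = ["tcp", "udp"]
--
-- layer_5_protos = ["tls"]
--
-- layer_7_protos = ["http", "https", "ssdp", "mdns", "ntp", "tplink-smarthome", "mqtt", "secure-mqtt", "classicstun", "stun", "ajp13", "quic"]
--
-- def parse_protocol_list(protocol_list):
--
--     # Create master dictionary
--     ret_dict = dict()
--     ret_dict["Layer 3"] = []
--     ret_dict["Layer 4"] = []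
--     ret_dict["Layer 5"] = []
--     ret_dict["Layer 7"] = []
--     unknown_protos = []
--
--     for element in protocol_list:
--
--         # Due to how tshark works, we might have elements in the last past the application protocol we care about
--         # e.g. eth -> ip -> http -> json, we only care up to http in this case.
--         # Only scan until we find a layer 7 protocol
--         for protocol in element:
--
--             # Top level proto will be eth, we can skip this
--             if protocol == "eth":
--                 continue
--
--             # Add all < layer 7 protocols
--             # Layer 3
--             if (protocol in layer_3_protos):
--                 if(protocol not in ret_dict["Layer 3"]):
--                     ret_dict["Layer 3"].append(protocol)
--
--             # Layer 4
--             elif (protocol in layer_4_protos):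
--                 if(protocol not in ret_dict["Layer 4"]):
--                     ret_dict["Layer 4"].append(protocol)
--
--             # Layer 5
--             elif (protocol in layer_5_protos):
--                 if(protocol not in ret_dict["Layer 5"]):
--                     ret_dict["Layer 5"].append(protocol)
--
--             # If we found a layer 7 protocol, we can stop parsing this chain of protocols
--             elif (protocol in layer_7_protos):
--                 if(protocol not in ret_dict["Layer 7"]):
--                     ret_dict["Layer 7"].append(protocol)
--                 break
--
--             # If the protcol is "tcp.segments" we skip it, it gives no new information
--             # If it's not, we add it to the unknown protocols
--             elif (protocol != "tcp.segments"):
--                 if(protocol not in unknown_protos):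
--                     unknown_protos.append(protocol)
--
--     return ret_dict, unknown_protos
-- ===== SOURCE B (Python) =====
-- layer_3_protos = ["ip", "ipv6"]
--
-- layer_4_protos = ["tcp", "udp"]
--
-- layer_5_protos = ["tls"]
--
-- layer_7_protos = ["http", "https", "ssdp", "mdns", "ntp", "tplink-smarthome", "mqtt", "secure-mqtt", "classicstun", "stun", "ajp13", "quic"]
--
-- def _truncate(element):
--     # the chain up to and including its first Layer-7 protocol
--     out = []
--     for p in element:
--         out.append(p)
--         if p in layer_7_protos:
--             break
--     return out
--
-- def parse_protocol_list(protocol_list):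
--     # Pass 1: flatten all chains, truncating each just past its first Layer-7 protocol.
--     stream = []
--     for element in protocol_list:
--         stream.extend(_truncate(element))
--     # Pass 2: drop eth / tcp.segments and deduplicate globally in first-occurrence order.
--     seen = set()
--     tokens = []
--     for p in stream:
--         if p == "eth" or p == "tcp.segments" or p in seen:
--             continue
--         seen.add(p)
--         tokens.append(p)
--     # Pass 3: partition the deduplicated stream by layer (layers are disjoint, so
--     # global first-occurrence dedup followed by filtering preserves each list's order).
--     ret_dict = {
--         "Layer 3": [p for p in tokens if p in layer_3_protos],
--         "Layer 4": [p for p in tokens if p in layer_4_protos],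
--         "Layer 5": [p for p in tokens if p in layer_5_protos],
--         "Layer 7": [p for p in tokens if p in layer_7_protos],
--     }
--     unknown = [p for p in tokens
--                if p not in layer_3_protos and p not in layer_4_protos
--                and p not in layer_5_protos and p not in layer_7_protos]
--     return ret_dict, unknown
-- ===== Notes on version B (the rewrite author's own statement) =====
-- stated objective: faster
-- what changed: A classifies and deduplicates in one nested loop, scanning the growing output list before every append; B uses three staged passes: truncate each chain at its first Layer-7 protocol, flatten into one token stream, deduplicate the stream globally with a hash set in first-occurrence order, then partition the deduplicated tokens into the four layer lists and the unknowns by filtering (correct because the layer lists are pairwise disjoint).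
import Mathlib
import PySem

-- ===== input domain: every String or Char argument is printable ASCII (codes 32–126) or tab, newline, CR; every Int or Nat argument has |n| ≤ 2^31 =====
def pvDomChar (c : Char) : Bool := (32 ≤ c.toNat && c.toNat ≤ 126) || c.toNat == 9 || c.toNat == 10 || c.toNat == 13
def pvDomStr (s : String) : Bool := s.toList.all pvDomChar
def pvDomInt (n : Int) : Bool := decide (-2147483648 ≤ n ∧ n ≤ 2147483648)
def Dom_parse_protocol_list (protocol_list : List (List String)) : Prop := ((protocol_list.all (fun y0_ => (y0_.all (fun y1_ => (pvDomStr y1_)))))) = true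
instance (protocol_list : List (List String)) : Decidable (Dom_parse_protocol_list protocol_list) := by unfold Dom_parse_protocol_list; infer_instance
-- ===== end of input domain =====

-- B replaces A's single interleaved classify-and-dedup nested loop by three staged passes:
-- truncate each chain at its first Layer-7 protocol, flatten into one token stream,
-- deduplicate the stream globally (hash set) in first-occurrence order, then partition
-- the deduplicated stream into the four layer lists and the unknowns by filtering.

-- state of A's loop: (Layer 3, Layer 4, Layer 5, Layer 7, unknown) lists
abbrev PvSt := List String × List String × List String × List String × List String

def pvL3 : List String := ["ip", "ipv6"]
def pvL4 : List String := ["tcp", "udp"]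
def pvL5 : List String := ["tls"]
def pvL7 : List String := ["http", "https", "ssdp", "mdns", "ntp", "tplink-smarthome", "mqtt", "secure-mqtt", "classicstun", "stun", "ajp13", "quic"]

-- ===== PORT A =====
-- inner 'for protocol in element' loop of A (dedup check before each append, break on Layer 7)
def pvInnerA : List String → PvSt → PvSt
  | [], s => s
  | p :: ps, (l3, l4, l5, l7, u) =>
    if p = "eth" then pvInnerA ps (l3, l4, l5, l7, u)
    else if p ∈ pvL3 then pvInnerA ps ((if p ∈ l3 then l3 else l3 ++ [p]), l4, l5, l7, u)
    else if p ∈ pvL4 then pvInnerA ps (l3, (if p ∈ l4 then l4 else l4 ++ [p]), l5, l7, u)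
    else if p ∈ pvL5 then pvInnerA ps (l3, l4, (if p ∈ l5 then l5 else l5 ++ [p]), l7, u)
    else if p ∈ pvL7 then (l3, l4, l5, (if p ∈ l7 then l7 else l7 ++ [p]), u)  -- break
    else if p ≠ "tcp.segments" then pvInnerA ps (l3, l4, l5, l7, (if p ∈ u then u else u ++ [p]))
    else pvInnerA ps (l3, l4, l5, l7, u)

def parse_protocol_list (protocol_list : List (List String)) : (List (String × List String)) × List String :=
  let st := protocol_list.foldl (fun s el => pvInnerA el s) ([], [], [], [], [])
  ([("Layer 3", st.1), ("Layer 4", st.2.1), ("Layer 5", st.2.2.1), ("Layer 7", st.2.2.2.1)], st.2.2.2.2)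

-- ===== PORT B =====
-- _truncate: the chain up to and including its first Layer-7 protocol
def pvTrunc : List String → List String
  | [] => []
  | p :: ps => if p ∈ pvL7 then [p] else p :: pvTrunc ps

-- pass 2: drop eth / tcp.segments, deduplicate globally with a seen-set, keep order
def pvClean (seen : PySem.Set String) : List String → List String
  | [] => []
  | p :: ps =>
    if p = "eth" ∨ p = "tcp.segments" ∨ p ∈ seen then pvClean seen ps
    else p :: pvClean (PySem.Set.add seen p) ps

def parse_protocol_list_alt (protocol_list : List (List String)) : (List (String × List String)) × List String :=
  let stream := protocol_list.foldl (fun acc el => acc ++ pvTrunc el) []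
  let tokens := pvClean PySem.Set.empty stream
  ([("Layer 3", tokens.filter (fun p => decide (p ∈ pvL3))),
    ("Layer 4", tokens.filter (fun p => decide (p ∈ pvL4))),
    ("Layer 5", tokens.filter (fun p => decide (p ∈ pvL5))),
    ("Layer 7", tokens.filter (fun p => decide (p ∈ pvL7)))],
   tokens.filter (fun p => decide (p ∉ pvL3 ∧ p ∉ pvL4 ∧ p ∉ pvL5 ∧ p ∉ pvL7)))

-- ===== PRECONDITION & SPEC =====
def Spec_parse_protocol_list (protocol_list : List (List String)) (out : (List (String × List String)) × List String) : Prop := out = parse_protocol_list_alt protocol_list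
instance (protocol_list : List (List String)) (out : (List (String × List String)) × List String) : Decidable (Spec_parse_protocol_list protocol_list out) := by unfold Spec_parse_protocol_list; infer_instance

-- ===== CLAIM (what is proved, stated in full; the proofs are below) =====
def Claim_equal_parse_protocol_list : Prop := ∀ (protocol_list : List (List String)), Dom_parse_protocol_list protocol_list → Spec_parse_protocol_list protocol_list (parse_protocol_list protocol_list)

-- ===== LEMMAS AND PROOFS =====

-- partition of a deduplicated token list into A's five-list state
def pvP (l : List String) : PvSt :=
  (l.filter (fun p => decide (p ∈ pvL3)),
   l.filter (fun p => decide (p ∈ pvL4)),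
   l.filter (fun p => decide (p ∈ pvL5)),
   l.filter (fun p => decide (p ∈ pvL7)),
   l.filter (fun p => decide (p ∉ pvL3 ∧ p ∉ pvL4 ∧ p ∉ pvL5 ∧ p ∉ pvL7)))

theorem pv_clean_snoc : ∀ (s : List String) (seen : PySem.Set String) (p : String),
    pvClean seen (s ++ [p]) =
      if p = "eth" ∨ p = "tcp.segments" ∨ p ∈ seen ∨ p ∈ pvClean seen s
      then pvClean seen s else pvClean seen s ++ [p] := by
  intro s
  induction s with
  | nil =>
    intro seen p
    by_cases h : p = "eth" ∨ p = "tcp.segments" ∨ p ∈ seen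
    · simp [pvClean, h]
    · simp [pvClean, h]
  | cons x xs ih =>
    intro seen p
    by_cases hx : x = "eth" ∨ x = "tcp.segments" ∨ x ∈ seen
    · simp only [List.cons_append, pvClean, if_pos hx, ih]
    · have hxs : x ∉ seen := fun h => hx (Or.inr (Or.inr h))
      have hadd : PySem.Set.add seen x = seen ++ [x] := by
        simp [PySem.Set.add, PySem.Set.contains, hxs]
      simp only [List.cons_append, pvClean, if_neg hx, ih, hadd]
      by_cases hpx : p = x
      · subst hpx
        simp [List.mem_append]
      · have hiff : (p = "eth" ∨ p = "tcp.segments" ∨ p ∈ seen ++ [x] ∨ p ∈ pvClean (seen ++ [x]) xs)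
            ↔ (p = "eth" ∨ p = "tcp.segments" ∨ p ∈ seen ∨ p ∈ x :: pvClean (seen ++ [x]) xs) := by
          simp [List.mem_append, List.mem_cons, hpx]
        by_cases h : p = "eth" ∨ p = "tcp.segments" ∨ p ∈ seen ∨ p ∈ x :: pvClean (seen ++ [x]) xs
        · rw [if_pos (hiff.mpr h), if_pos h]
        · rw [if_neg (fun hh => h (hiff.mp hh)), if_neg h]

theorem pvL3_facts {p : String} (h : p ∈ pvL3) :
    p ∉ pvL4 ∧ p ∉ pvL5 ∧ p ∉ pvL7 ∧ p ≠ "tcp.segments" := by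
  fin_cases h <;> decide

theorem pvL4_facts {p : String} (h : p ∈ pvL4) :
    p ∉ pvL5 ∧ p ∉ pvL7 ∧ p ≠ "tcp.segments" := by
  fin_cases h <;> decide

theorem pvL5_facts {p : String} (h : p ∈ pvL5) :
    p ∉ pvL7 ∧ p ≠ "tcp.segments" := by
  fin_cases h; decide

theorem pvL7_facts {p : String} (h : p ∈ pvL7) : p ≠ "tcp.segments" := by
  fin_cases h <;> decide

-- snoc through pvClean with the empty initial seen-set
theorem pv_d_snoc (s : List String) (p : String) (he : p ≠ "eth") (ht : p ≠ "tcp.segments") :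
    pvClean [] (s ++ [p]) =
      if p ∈ pvClean [] s then pvClean [] s else pvClean [] s ++ [p] := by
  rw [pv_clean_snoc]; simp [he, ht]

theorem pv_d_snoc_drop (s : List String) (p : String) (h : p = "eth" ∨ p = "tcp.segments") :
    pvClean [] (s ++ [p]) = pvClean [] s := by
  rw [pv_clean_snoc]
  rcases h with rfl | rfl <;> simp

theorem pv_inner : ∀ (ps : List String) (s : List String),
    pvInnerA ps (pvP (pvClean [] s)) = pvP (pvClean [] (s ++ pvTrunc ps)) := by
  intro ps
  induction ps with
  | nil => intro s; simp [pvTrunc, pvInnerA]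
  | cons p ps ih =>
    intro s
    by_cases he : p = "eth"
    · -- skipped token
      have h7 : p ∉ pvL7 := by subst he; decide
      have h1 := ih (s ++ [p])
      rw [pv_d_snoc_drop s p (Or.inl he)] at h1
      rw [show pvTrunc (p :: ps) = p :: pvTrunc ps from by simp [pvTrunc, h7],
          List.append_cons, ← h1]
      simp [pvInnerA, he]
    · by_cases h3 : p ∈ pvL3
      · obtain ⟨h4, h5, h7, hseg⟩ := pvL3_facts h3
        have h1 := ih (s ++ [p])
        rw [pv_d_snoc s p he hseg] at h1
        rw [show pvTrunc (p :: ps) = p :: pvTrunc ps from by simp [pvTrunc, h7],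
            List.append_cons, ← h1]
        by_cases hm : p ∈ pvClean [] s
        · simp [pvInnerA, pvP, he, h3, hm, List.mem_filter]
        · simp [pvInnerA, pvP, he, h3, h4, h5, h7, hm, List.mem_filter, List.filter_append]
      · by_cases h4 : p ∈ pvL4
        · obtain ⟨h5, h7, hseg⟩ := pvL4_facts h4
          have h1 := ih (s ++ [p])
          rw [pv_d_snoc s p he hseg] at h1
          rw [show pvTrunc (p :: ps) = p :: pvTrunc ps from by simp [pvTrunc, h7],
              List.append_cons, ← h1]
          by_cases hm : p ∈ pvClean [] s
          · simp [pvInnerA, pvP, he, h3, h4, hm, List.mem_filter]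
          · simp [pvInnerA, pvP, he, h3, h4, h5, h7, hm, List.mem_filter, List.filter_append]
        · by_cases h5 : p ∈ pvL5
          · obtain ⟨h7, hseg⟩ := pvL5_facts h5
            have h1 := ih (s ++ [p])
            rw [pv_d_snoc s p he hseg] at h1
            rw [show pvTrunc (p :: ps) = p :: pvTrunc ps from by simp [pvTrunc, h7],
                List.append_cons, ← h1]
            by_cases hm : p ∈ pvClean [] s
            · simp [pvInnerA, pvP, he, h3, h4, h5, hm, List.mem_filter]
            · simp [pvInnerA, pvP, he, h3, h4, h5, h7, hm, List.mem_filter, List.filter_append]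
          · by_cases h7 : p ∈ pvL7
            · -- break: the truncated chain ends here
              have hseg := pvL7_facts h7
              rw [show pvTrunc (p :: ps) = [p] from by simp [pvTrunc, h7],
                  pv_d_snoc s p he hseg]
              by_cases hm : p ∈ pvClean [] s
              · simp [pvInnerA, pvP, he, h3, h4, h5, h7, hm, List.mem_filter]
              · simp [pvInnerA, pvP, he, h3, h4, h5, h7, hm, List.mem_filter, List.filter_append]
            · by_cases hseg : p = "tcp.segments"
              · -- skipped token
                have h1 := ih (s ++ [p])
                rw [pv_d_snoc_drop s p (Or.inr hseg)] at h1
                rw [show pvTrunc (p :: ps) = p :: pvTrunc ps from by simp [pvTrunc, h7],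
                    List.append_cons, ← h1]
                subst hseg
                simp [pvInnerA, pvL3, pvL4, pvL5, pvL7]
              · -- unknown protocol
                have h1 := ih (s ++ [p])
                rw [pv_d_snoc s p he hseg] at h1
                rw [show pvTrunc (p :: ps) = p :: pvTrunc ps from by simp [pvTrunc, h7],
                    List.append_cons, ← h1]
                by_cases hm : p ∈ pvClean [] s
                · simp [pvInnerA, pvP, he, h3, h4, h5, h7, hseg, hm, List.mem_filter]
                · simp [pvInnerA, pvP, he, h3, h4, h5, h7, hseg, hm, List.mem_filter, List.filter_append]

theorem pv_fold : ∀ (pl : List (List String)) (s : List String),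
    pl.foldl (fun st el => pvInnerA el st) (pvP (pvClean [] s))
      = pvP (pvClean [] (pl.foldl (fun acc el => acc ++ pvTrunc el) s)) := by
  intro pl
  induction pl with
  | nil => intro s; rfl
  | cons el rest ih =>
    intro s
    simp only [List.foldl_cons, pv_inner, ih]

-- ===== VERDICT (by name: the statement is the Claim_ definition above) =====
theorem parse_protocol_list_spec : Claim_equal_parse_protocol_list := by
  intro pl _
  unfold Spec_parse_protocol_list parse_protocol_list parse_protocol_list_alt
  have h := pv_fold pl []
  simp only [show pvP (pvClean [] []) = (([], [], [], [], []) : PvSt) from rfl] at h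
  simp only [h, pvP, PySem.Set.empty]
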